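-- pv_equiv track=rewrite | github.com/NemoDarjeeling/Fintech512 | week3/kwic_revised.py | parseKW
-- ===== SOURCE A (Python) =====
-- def parseKW(content, target):
--     kw = []
--     for i in content:
--         for j in i:
--             if j not in target:
--                 kw.append(j)
--     kw = sorted(list(set(kw)))
--     return kw
-- ===== SOURCE B (Python) =====
-- def parseKW(content, target):
--     occ = sorted(j for i in content for j in i)
--     kw = []
--     for w in occ:
--         if (not kw or kw[-1] != w) and w not in target:
--             kw.append(w)
--     return kw
-- ===== Notes on version B (the rewrite author's own statement) =====
-- stated objective: alternative
-- what changed: B replaces A's hash-set deduplication (filter every occurrence, dedup via set(), then sort) with sort-then-scan: it sorts all occurrences first, then one linear scan drops adjacent duplicates (comparing each word with the last kept one) and filters against target, so no hash set is used at all.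
import Mathlib
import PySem

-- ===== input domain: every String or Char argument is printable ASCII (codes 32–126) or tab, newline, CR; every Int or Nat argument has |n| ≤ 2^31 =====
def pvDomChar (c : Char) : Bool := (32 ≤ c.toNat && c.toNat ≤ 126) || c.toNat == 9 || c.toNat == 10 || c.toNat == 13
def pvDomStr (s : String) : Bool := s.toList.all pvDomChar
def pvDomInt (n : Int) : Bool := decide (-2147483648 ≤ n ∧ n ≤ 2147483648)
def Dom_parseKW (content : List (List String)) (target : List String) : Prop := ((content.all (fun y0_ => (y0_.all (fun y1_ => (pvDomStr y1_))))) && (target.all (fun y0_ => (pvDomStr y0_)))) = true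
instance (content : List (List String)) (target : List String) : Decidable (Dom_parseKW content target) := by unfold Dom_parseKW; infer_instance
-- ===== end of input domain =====

-- B replaces A's hash-set deduplication with sort-then-scan: sort all occurrences, then one linear
-- scan drops adjacent duplicates and filters against target; same return value.


-- ===== PORT A =====
def parseKW (content : List (List String)) (target : List String) : List String :=
  let kw := content.foldl (fun acc i =>
    i.foldl (fun acc j => if target.contains j then acc else acc ++ [j]) acc) []
  PySem.List.sorted (PySem.Set.ofList kw) (fun x => x) false

-- ===== PORT B =====
def parseKW_alt (content : List (List String)) (target : List String) : List String :=
  let occ := PySem.List.sorted content.flatten (fun x => x) false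
  occ.foldl (fun kw w =>
    if (kw.getLast? != some w) && !target.contains w then kw ++ [w] else kw) []

-- ===== PRECONDITION & SPEC =====
def Spec_parseKW (content : List (List String)) (target : List String) (out : List String) : Prop := out = parseKW_alt content target
instance (content : List (List String)) (target : List String) (out : List String) : Decidable (Spec_parseKW content target out) := by unfold Spec_parseKW; infer_instance

-- ===== CLAIM (what is proved, stated in full; the proofs are below) =====
def Claim_equal_parseKW : Prop := ∀ (content : List (List String)) (target : List String), Dom_parseKW content target → Spec_parseKW content target (parseKW content target)

-- ===== LEMMAS AND PROOFS =====

-- A's double loop collects, in order, the occurrences not in target: a filter of the flattened content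
theorem kwA_eq_gen (target : List String) (content : List (List String)) (acc : List String) :
    content.foldl (fun acc i =>
      i.foldl (fun acc j => if target.contains j then acc else acc ++ [j]) acc) acc
    = acc ++ content.flatten.filter (fun j => !target.contains j) := by
  induction content generalizing acc with
  | nil => simp
  | cons i rest ih =>
    have hinner : ∀ acc : List String,
        i.foldl (fun acc j => if target.contains j then acc else acc ++ [j]) acc
        = acc ++ i.filter (fun j => !target.contains j) := by
      induction i with
      | nil => intro acc; simp
      | cons j js ihj =>
        intro acc
        rw [List.foldl_cons, List.filter_cons]
        by_cases h : target.contains j = true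
        · rw [if_pos h, ihj]; rw [List.contains_iff_mem] at h; simp [h]
        · rw [if_neg h, ihj]; rw [List.contains_iff_mem] at h; simp [h]
    rw [List.foldl_cons, hinner, ih]
    simp [List.filter_append]

-- in a strictly increasing list bounded above by a member x, that member is the last element
theorem last_of_mem_of_ub (x : String) : ∀ (out : List String), out.Pairwise (· < ·) →
    (∀ a ∈ out, a ≤ x) → x ∈ out → out.getLast? = some x := by
  intro out
  induction out with
  | nil => intro _ _ h; cases h
  | cons b rest ih =>
    intro hpw hub hmem
    cases rest with
    | nil =>
      rcases List.mem_cons.mp hmem with h | h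
      · simp [h]
      · cases h
    | cons c cs =>
      rw [List.getLast?_cons_cons]
      rcases List.pairwise_cons.mp hpw with ⟨hb, hpw'⟩
      rcases List.mem_cons.mp hmem with h | h
      · subst h
        exact absurd (hub c (by simp)) (not_le.mpr (hb c (by simp)))
      · exact ih hpw' (fun a ha => hub a (by simp [ha])) h

-- B's scan over a nondecreasing list: strictly increasing output whose members are
-- exactly the old members plus the scanned words passing the filter
theorem scan_spec (target : List String) : ∀ (xs out : List String),
    xs.Pairwise (· ≤ ·) → out.Pairwise (· < ·) →
    (∀ a ∈ out, (!target.contains a) = true) →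
    (∀ a ∈ out, ∀ y ∈ xs, a ≤ y) →
    (xs.foldl (fun kw w =>
        if (kw.getLast? != some w) && !target.contains w then kw ++ [w] else kw) out).Pairwise (· < ·)
    ∧ ∀ a, a ∈ xs.foldl (fun kw w =>
        if (kw.getLast? != some w) && !target.contains w then kw ++ [w] else kw) out
      ↔ a ∈ out ∨ (a ∈ xs ∧ (!target.contains a) = true) := by
  intro xs
  induction xs with
  | nil =>
    intro out _ hpw _ _
    refine ⟨hpw, fun a => ?_⟩
    simp
  | cons x xs ih =>
    intro out hsorted hpw hfil hub
    rcases List.pairwise_cons.mp hsorted with ⟨hx, hsorted'⟩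
    rw [List.foldl_cons]
    by_cases hc : ((out.getLast? != some x) && !target.contains x) = true
    · rw [if_pos hc]
      simp only [Bool.and_eq_true, bne_iff_ne, ne_eq] at hc
      rcases hc with ⟨hlast, hpx⟩
      have hlt : ∀ a ∈ out, a < x := by
        intro a ha
        rcases lt_or_eq_of_le (hub a ha x (by simp)) with h | h
        · exact h
        · subst h
          exact absurd (last_of_mem_of_ub a out hpw (fun b hb => hub b hb a (by simp)) ha)
            hlast
      have hpw' : (out ++ [x]).Pairwise (· < ·) :=
        List.pairwise_append.mpr ⟨hpw, List.pairwise_singleton _ _,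
          fun a ha b hb => by rw [List.mem_singleton] at hb; subst hb; exact hlt a ha⟩
      have hfil' : ∀ a ∈ out ++ [x], (!target.contains a) = true := by
        intro a ha
        rcases List.mem_append.mp ha with h | h
        · exact hfil a h
        · simp at h; subst h; exact hpx
      have hub' : ∀ a ∈ out ++ [x], ∀ y ∈ xs, a ≤ y := by
        intro a ha y hy
        rcases List.mem_append.mp ha with h | h
        · exact hub a h y (by simp [hy])
        · simp at h; subst h; exact hx y hy
      rcases ih (out ++ [x]) hsorted' hpw' hfil' hub' with ⟨h1, h2⟩
      refine ⟨h1, fun a => ?_⟩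
      rw [h2]
      constructor
      · rintro (h | h)
        · rcases List.mem_append.mp h with h | h
          · exact Or.inl h
          · simp at h; subst h; exact Or.inr ⟨by simp, hpx⟩
        · exact Or.inr ⟨by simp [h.1], h.2⟩
      · rintro (h | ⟨hmem, hp⟩)
        · exact Or.inl (List.mem_append.mpr (Or.inl h))
        · rcases List.mem_cons.mp hmem with h | h
          · exact Or.inl (List.mem_append.mpr (Or.inr (by simp [h])))
          · exact Or.inr ⟨h, hp⟩
    · rw [if_neg hc]
      have hub' : ∀ a ∈ out, ∀ y ∈ xs, a ≤ y := fun a ha y hy => hub a ha y (by simp [hy])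
      rcases ih out hsorted' hpw hfil hub' with ⟨h1, h2⟩
      refine ⟨h1, fun a => ?_⟩
      rw [h2]
      constructor
      · rintro (h | h)
        · exact Or.inl h
        · exact Or.inr ⟨by simp [h.1], h.2⟩
      · rintro (h | ⟨hmem, hp⟩)
        · exact Or.inl h
        · rcases List.mem_cons.mp hmem with h | h
          · subst h
            -- the skipped word: either it fails the filter (contradiction with hp)
            -- or it is already the last element of out
            have hgl : out.getLast? = some a := by
              by_contra h'
              exact hc (by rw [Bool.and_eq_true, bne_iff_ne]; exact ⟨h', hp⟩)
            exact Or.inl (List.mem_of_getLast? hgl)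
          · exact Or.inr ⟨h, hp⟩

-- ===== VERDICT (by name: the statement is the Claim_ definition above) =====
theorem parseKW_spec : Claim_equal_parseKW := by
  intro content target _
  unfold Spec_parseKW parseKW parseKW_alt
  dsimp only
  rw [kwA_eq_gen, List.nil_append]
  set p : String → Bool := fun j => !target.contains j with hp
  set L : List String := content.flatten with hL
  have hsorted := PySem.List.sorted_pairwise L (fun x => x) (κ := String)
  rcases scan_spec target (PySem.List.sorted L (fun x => x) false) [] hsorted
      (by simp) (by simp) (by simp) with ⟨hpwB, hmemB⟩
  apply PySem.List.sorted_eq_of_perm_of_pairwise_lt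
  · rw [List.perm_ext_iff_of_nodup (hpwB.imp ne_of_lt) (PySem.Set.nodup_ofList _)]
    intro a
    rw [hmemB a, PySem.Set.mem_ofList, List.mem_filter]
    simp [hp, PySem.List.mem_sorted]
  · exact hpwB
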